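-- pv_equiv track=rewrite | github.com/leotamminen/tira24k | viikko3/sequences.py | count
-- ===== SOURCE A (Python) =====
-- def count(s):
--     maara = 0
--     # sanakirja merkkejen kohdille
--     merkit = {"t": None, "i": None, "r": None, "a": None}
--
--     # Tarkistaa, onko kaikki merkit löydetty
--     def kaikki_merkit_loytyy():
--         return merkit["t"] is not None and merkit["i"] is not None and merkit["r"] is not None and merkit["a"] is not None
--
--     # Palauttaa pienimmän indeksin
--     def pienin():
--         return min(merkit["t"], merkit["i"], merkit["r"], merkit["a"])
--
--     # käy läpi merkkijonon
--     for i, v in enumerate(s):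
--         if v in merkit:
--             merkit[v] = i
--
--         # Jos kaikki merkit on löydetty, lisätään laskuriin pienin indeksi
--         if kaikki_merkit_loytyy():
--             maara += pienin() - (-1)
--
--     return maara
-- ===== SOURCE B (Python) =====
-- def count(s):
--     # Two-pointer sliding window: running counts of t,i,r,a in s[left:i+1];
--     # once all four are present, shrink left maximally and add left+1.
--     ct = ci = cr = ca = 0
--     left = 0
--     total = 0
--     for ch in s:
--         if ch == 't':
--             ct += 1
--         elif ch == 'i':
--             ci += 1
--         elif ch == 'r':
--             cr += 1
--         elif ch == 'a':
--             ca += 1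
--         if ct and ci and cr and ca:
--             while True:
--                 c = s[left]
--                 if c == 't':
--                     if ct == 1:
--                         break
--                     ct -= 1
--                 elif c == 'i':
--                     if ci == 1:
--                         break
--                     ci -= 1
--                 elif c == 'r':
--                     if cr == 1:
--                         break
--                     cr -= 1
--                 elif c == 'a':
--                     if ca == 1:
--                         break
--                     ca -= 1
--                 left += 1
--             total += left + 1
--     return total
-- ===== Notes on version B (the rewrite author's own statement) =====
-- stated objective: alternative
-- what changed: A tracks the last-seen index of each of 't','i','r','a' and adds min(last indices)+1 per step; B instead maintains a two-pointer sliding window with running occurrence counts and a left boundary that is advanced while the window still contains all four characters, adding left+1 per step.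
import Mathlib
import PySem

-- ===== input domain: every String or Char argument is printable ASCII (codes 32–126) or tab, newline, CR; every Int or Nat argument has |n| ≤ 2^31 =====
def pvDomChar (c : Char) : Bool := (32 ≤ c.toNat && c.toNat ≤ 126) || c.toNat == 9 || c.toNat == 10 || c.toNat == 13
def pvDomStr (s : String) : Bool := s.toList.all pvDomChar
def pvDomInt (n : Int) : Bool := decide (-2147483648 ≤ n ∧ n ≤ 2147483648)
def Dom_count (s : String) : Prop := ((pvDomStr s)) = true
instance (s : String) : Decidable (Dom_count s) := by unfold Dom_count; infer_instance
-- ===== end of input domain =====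

-- B replaces A's last-seen-index dict + min with a two-pointer sliding window of running counts (alternative decomposition, same cost).

-- ===== PORT A =====
-- A's dict {"t","i","r","a"} of last-seen indices (None = not seen) becomes four Option Int fields in fixed key order.
def stepA (st : Int × Option Int × Option Int × Option Int × Option Int) (iv : Int × Char) :
    Int × Option Int × Option Int × Option Int × Option Int :=
  let mt := if iv.2 = 't' then some iv.1 else st.2.1
  let mi := if iv.2 = 'i' then some iv.1 else st.2.2.1
  let mr := if iv.2 = 'r' then some iv.1 else st.2.2.2.1
  let ma := if iv.2 = 'a' then some iv.1 else st.2.2.2.2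
  let maara :=
    if mt.isSome && mi.isSome && mr.isSome && ma.isSome then
      -- maara += pienin() - (-1); the getD 0 defaults are only read under the isSome guard
      st.1 + (min (min (min (mt.getD 0) (mi.getD 0)) (mr.getD 0)) (ma.getD 0) - (-1))
    else st.1
  (maara, mt, mi, mr, ma)

def count (s : String) : Int :=
  ((PySem.List.enumerate s.toList 0).foldl stepA (0, none, none, none, none)).1

-- ===== PORT B =====
-- B's 'while True' shrink loop; cs[left]? = none is where Python's s[left] would raise (unreachable: some target count is 1)
def shrinkB (cs : List Char) (left ct ci cr ca : Nat) : Nat × Nat × Nat × Nat × Nat :=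
  match h : cs[left]? with
  | none => (left, ct, ci, cr, ca)
  | some c =>
    if c = 't' then (if ct = 1 then (left, ct, ci, cr, ca) else shrinkB cs (left+1) (ct-1) ci cr ca)
    else if c = 'i' then (if ci = 1 then (left, ct, ci, cr, ca) else shrinkB cs (left+1) ct (ci-1) cr ca)
    else if c = 'r' then (if cr = 1 then (left, ct, ci, cr, ca) else shrinkB cs (left+1) ct ci (cr-1) ca)
    else if c = 'a' then (if ca = 1 then (left, ct, ci, cr, ca) else shrinkB cs (left+1) ct ci cr (ca-1))
    else shrinkB cs (left+1) ct ci cr ca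
termination_by cs.length - left
decreasing_by
  all_goals
    obtain ⟨hl, -⟩ := List.getElem?_eq_some_iff.mp h
    omega

-- state: (total, left, ct, ci, cr, ca)
def stepB (cs : List Char) (st : Int × Nat × Nat × Nat × Nat × Nat) (ch : Char) :
    Int × Nat × Nat × Nat × Nat × Nat :=
  let cnts :=
    if ch = 't' then (st.2.2.1 + 1, st.2.2.2.1, st.2.2.2.2.1, st.2.2.2.2.2)
    else if ch = 'i' then (st.2.2.1, st.2.2.2.1 + 1, st.2.2.2.2.1, st.2.2.2.2.2)
    else if ch = 'r' then (st.2.2.1, st.2.2.2.1, st.2.2.2.2.1 + 1, st.2.2.2.2.2)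
    else if ch = 'a' then (st.2.2.1, st.2.2.2.1, st.2.2.2.2.1, st.2.2.2.2.2 + 1)
    else (st.2.2.1, st.2.2.2.1, st.2.2.2.2.1, st.2.2.2.2.2)
  if cnts.1 ≠ 0 ∧ cnts.2.1 ≠ 0 ∧ cnts.2.2.1 ≠ 0 ∧ cnts.2.2.2 ≠ 0 then
    let r := shrinkB cs st.2.1 cnts.1 cnts.2.1 cnts.2.2.1 cnts.2.2.2
    (st.1 + ((r.1 : Int) + 1), r)
  else (st.1, st.2.1, cnts)

def count_alt (s : String) : Int :=
  (s.toList.foldl (stepB s.toList) (0, 0, 0, 0, 0, 0)).1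

-- ===== PRECONDITION & SPEC =====
def Spec_count (s : String) (out : Int) : Prop := out = count_alt s
instance (s : String) (out : Int) : Decidable (Spec_count s out) := by unfold Spec_count; infer_instance

-- ===== CLAIM (what is proved, stated in full; the proofs are below) =====
def Claim_equal_count : Prop := ∀ (s : String), Dom_count s → Spec_count s (count s)

-- ===== LEMMAS AND PROOFS =====

def lastN (c : Char) (p : List Char) : Option Nat :=
  p.zipIdx.foldl (fun acc vi => if vi.1 = c then some vi.2 else acc) none
theorem lastN_snoc (c v : Char) (p : List Char) :
    lastN c (p ++ [v]) = if v = c then some p.length else lastN c p := by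
  unfold lastN
  rw [List.zipIdx_append, List.foldl_append]
  simp [List.zipIdx]
theorem lastN_spec (c : Char) (p : List Char) :
    ∀ k, lastN c p = some k → k < p.length ∧ p[k]? = some c := by
  induction p using List.reverseRecOn with
  | nil => intro k h; simp [lastN] at h
  | append_singleton p v ih =>
    intro k h
    rw [lastN_snoc] at h
    by_cases hv : v = c
    · simp only [if_pos hv] at h
      obtain rfl : p.length = k := by simpa using h
      refine ⟨by simp, ?_⟩
      rw [List.getElem?_append_right (le_refl _)]
      simp [hv]
    · rw [if_neg hv] at h
      obtain ⟨hk, hg⟩ := ih k h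
      exact ⟨by simp; omega, by rw [List.getElem?_append_left hk]; exact hg⟩
theorem mem_drop_iff (c : Char) (p : List Char) (m : Nat) :
    c ∈ p.drop m ↔ ∃ k, lastN c p = some k ∧ m ≤ k := by
  induction p using List.reverseRecOn with
  | nil => simp [lastN]
  | append_singleton p v ih =>
    rw [lastN_snoc]
    by_cases hm : m ≤ p.length
    · rw [List.drop_append_of_le_length hm]
      by_cases hv : v = c
      · subst hv
        constructor
        · intro _; exact ⟨p.length, by simp, hm⟩
        · intro _; simp
      · simp only [if_neg hv, List.mem_append]
        constructor
        · rintro (h | h)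
          · exact ih.mp h
          · simp at h; exact absurd h.symm hv
        · intro h; exact Or.inl (ih.mpr h)
    · have hnil : (p ++ [v]).drop m = [] := List.drop_eq_nil_of_le (by simp; omega)
      rw [hnil]
      simp only [List.not_mem_nil, false_iff]
      rintro ⟨k, hk, hmk⟩
      by_cases hv : v = c
      · rw [if_pos hv] at hk
        have : p.length = k := by simpa using hk
        omega
      · rw [if_neg hv] at hk
        have := (lastN_spec c p k hk).1
        omega
theorem mem_iff_lastN (c : Char) (p : List Char) :
    c ∈ p ↔ ∃ k, lastN c p = some k := by
  simpa using mem_drop_iff c p 0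
theorem count_drop_lastN (c : Char) (p : List Char) (m : Nat) (h : lastN c p = some m) :
    (p.drop m).count c = 1 := by
  obtain ⟨hm, hg⟩ := lastN_spec c p m h
  rw [List.drop_eq_getElem_cons hm, List.count_cons]
  obtain ⟨hlt, hpc⟩ := List.getElem?_eq_some_iff.mp hg
  have hz : (p.drop (m + 1)).count c = 0 := by
    rw [List.count_eq_zero]
    intro hmem
    obtain ⟨k, hk, hmk⟩ := (mem_drop_iff c p (m+1)).mp hmem
    rw [h] at hk; simp at hk; omega
  simp [hpc, hz]
def AllT (l : List Char) : Bool := l.contains 't' && l.contains 'i' && l.contains 'r' && l.contains 'a'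
def minL (p : List Char) : Nat :=
  min (min ((lastN 't' p).getD 0) ((lastN 'i' p).getD 0)) (min ((lastN 'r' p).getD 0) ((lastN 'a' p).getD 0))

theorem allT_drop_dest (p : List Char) (left : Nat) (h : AllT (p.drop left) = true) :
    ∃ kt ki kr ka, lastN 't' p = some kt ∧ lastN 'i' p = some ki ∧ lastN 'r' p = some kr
      ∧ lastN 'a' p = some ka ∧ left ≤ kt ∧ left ≤ ki ∧ left ≤ kr ∧ left ≤ ka
      ∧ minL p = min (min kt ki) (min kr ka) := by
  simp only [AllT, Bool.and_eq_true, List.contains_iff_mem] at h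
  obtain ⟨⟨⟨h1, h2⟩, h3⟩, h4⟩ := h
  obtain ⟨kt, et, lt⟩ := (mem_drop_iff _ p left).mp h1
  obtain ⟨ki, ei, li⟩ := (mem_drop_iff _ p left).mp h2
  obtain ⟨kr, er, lr⟩ := (mem_drop_iff _ p left).mp h3
  obtain ⟨ka, ea, la⟩ := (mem_drop_iff _ p left).mp h4
  exact ⟨kt, ki, kr, ka, et, ei, er, ea, lt, li, lr, la, by simp [minL, et, ei, er, ea]⟩

theorem allT_of_ge (p : List Char) (m : Nat) (hm : AllT (p.drop m) = true) (m' : Nat)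
    (h : m ≤ minL p → m' ≤ minL p) : AllT (p.drop m') = true := by
  obtain ⟨kt, ki, kr, ka, et, ei, er, ea, lt, li, lr, la, hmin⟩ := allT_drop_dest p m hm
  have hle : m' ≤ minL p := h (by omega)
  simp only [AllT, Bool.and_eq_true, List.contains_iff_mem]
  refine ⟨⟨⟨?_, ?_⟩, ?_⟩, ?_⟩ <;> rw [mem_drop_iff]
  · exact ⟨kt, et, by omega⟩
  · exact ⟨ki, ei, by omega⟩
  · exact ⟨kr, er, by omega⟩
  · exact ⟨ka, ea, by omega⟩

theorem shrink_eq (cs p : List Char) (hp : p <+: cs) :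
    ∀ (d left : Nat), minL p - left = d → AllT (p.drop left) = true →
    shrinkB cs left ((p.drop left).count 't') ((p.drop left).count 'i')
        ((p.drop left).count 'r') ((p.drop left).count 'a')
      = (minL p, (p.drop (minL p)).count 't', (p.drop (minL p)).count 'i',
         (p.drop (minL p)).count 'r', (p.drop (minL p)).count 'a') := by
  obtain ⟨tl, rfl⟩ := hp
  intro d
  induction d with
  | zero =>
    intro left hd hAll
    obtain ⟨kt, ki, kr, ka, et, ei, er, ea, lt, li, lr, la, hm⟩ := allT_drop_dest p left hAll
    have hkt := (lastN_spec _ p kt et).1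
    have hki := (lastN_spec _ p ki ei).1
    have hkr := (lastN_spec _ p kr er).1
    have hka := (lastN_spec _ p ka ea).1
    have hleft : minL p = left := by omega
    rw [hleft]
    have hlt : left < p.length := by omega
    have hdisj : left = kt ∨ left = ki ∨ left = kr ∨ left = ka := by omega
    rw [shrinkB.eq_def]
    split
    · rename_i heq
      rw [List.getElem?_append_left hlt, List.getElem?_eq_getElem hlt] at heq
      try simp at heq
    · rename_i c heq
      rw [List.getElem?_append_left hlt, List.getElem?_eq_getElem hlt] at heq
      obtain rfl : p[left] = c := by simpa using heq
      rcases hdisj with h0 | h0 | h0 | h0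
      · rw [← h0] at et
        have h1 : (p.drop left).count 't' = 1 := count_drop_lastN _ p _ et
        obtain ⟨hlt2, hg⟩ := lastN_spec _ p left et
        obtain ⟨_, hc⟩ := List.getElem?_eq_some_iff.mp hg
        rw [if_pos hc, if_pos h1]
      · rw [← h0] at ei
        have h1 : (p.drop left).count 'i' = 1 := count_drop_lastN _ p _ ei
        obtain ⟨hlt2, hg⟩ := lastN_spec _ p left ei
        obtain ⟨_, hc⟩ := List.getElem?_eq_some_iff.mp hg
        rw [if_neg (by rw [hc]; decide), if_pos hc, if_pos h1]
      · rw [← h0] at er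
        have h1 : (p.drop left).count 'r' = 1 := count_drop_lastN _ p _ er
        obtain ⟨hlt2, hg⟩ := lastN_spec _ p left er
        obtain ⟨_, hc⟩ := List.getElem?_eq_some_iff.mp hg
        rw [if_neg (by rw [hc]; decide), if_neg (by rw [hc]; decide), if_pos hc, if_pos h1]
      · rw [← h0] at ea
        have h1 : (p.drop left).count 'a' = 1 := count_drop_lastN _ p _ ea
        obtain ⟨hlt2, hg⟩ := lastN_spec _ p left ea
        obtain ⟨_, hc⟩ := List.getElem?_eq_some_iff.mp hg
        rw [if_neg (by rw [hc]; decide), if_neg (by rw [hc]; decide),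
            if_neg (by rw [hc]; decide), if_pos hc, if_pos h1]
  | succ d ih =>
    intro left hd hAll
    obtain ⟨kt, ki, kr, ka, et, ei, er, ea, lt, li, lr, la, hm⟩ := allT_drop_dest p left hAll
    have hkt := (lastN_spec _ p kt et).1
    have hlm : left < minL p := by omega
    have hlt : left < p.length := by omega
    have hAll' : AllT (p.drop (left + 1)) = true := allT_of_ge p left hAll (left + 1) (by omega)
    have hcons : p.drop left = p[left] :: p.drop (left + 1) := List.drop_eq_getElem_cons hlt
    have hnext := ih (left + 1) (by omega) hAll'
    rw [shrinkB.eq_def]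
    split
    · rename_i heq
      rw [List.getElem?_append_left hlt, List.getElem?_eq_getElem hlt] at heq
      try simp at heq
    · rename_i c heq
      rw [List.getElem?_append_left hlt, List.getElem?_eq_getElem hlt] at heq
      obtain rfl : p[left] = c := by simpa using heq
      have hcnt : ∀ x : Char, (p.drop left).count x
          = (p.drop (left + 1)).count x + if p[left] = x then 1 else 0 := by
        intro x; rw [hcons, List.count_cons]; simp [beq_iff_eq]
      by_cases h0 : p[left] = 't'
      · have hmem : 't' ∈ p.drop (left + 1) := (mem_drop_iff _ p _).mpr ⟨kt, et, by omega⟩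
        have hpos : 0 < (p.drop (left + 1)).count 't' := List.count_pos_iff.mpr hmem
        rw [if_pos h0, if_neg (by rw [hcnt 't', if_pos h0]; omega)]
        rw [hcnt 't', hcnt 'i', hcnt 'r', hcnt 'a',
            if_pos h0, if_neg (by rw [h0]; decide), if_neg (by rw [h0]; decide),
            if_neg (by rw [h0]; decide)]
        simpa using hnext
      · by_cases h1 : p[left] = 'i'
        · have hmem : 'i' ∈ p.drop (left + 1) := (mem_drop_iff _ p _).mpr ⟨ki, ei, by omega⟩
          have hpos : 0 < (p.drop (left + 1)).count 'i' := List.count_pos_iff.mpr hmem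
          rw [if_neg h0, if_pos h1, if_neg (by rw [hcnt 'i', if_pos h1]; omega)]
          rw [hcnt 't', hcnt 'i', hcnt 'r', hcnt 'a',
              if_pos h1, if_neg (by rw [h1]; decide), if_neg (by rw [h1]; decide),
              if_neg (by rw [h1]; decide)]
          simpa using hnext
        · by_cases h2 : p[left] = 'r'
          · have hmem : 'r' ∈ p.drop (left + 1) := (mem_drop_iff _ p _).mpr ⟨kr, er, by omega⟩
            have hpos : 0 < (p.drop (left + 1)).count 'r' := List.count_pos_iff.mpr hmem
            rw [if_neg h0, if_neg h1, if_pos h2, if_neg (by rw [hcnt 'r', if_pos h2]; omega)]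
            rw [hcnt 't', hcnt 'i', hcnt 'r', hcnt 'a',
                if_pos h2, if_neg (by rw [h2]; decide), if_neg (by rw [h2]; decide),
                if_neg (by rw [h2]; decide)]
            simpa using hnext
          · by_cases h3 : p[left] = 'a'
            · have hmem : 'a' ∈ p.drop (left + 1) := (mem_drop_iff _ p _).mpr ⟨ka, ea, by omega⟩
              have hpos : 0 < (p.drop (left + 1)).count 'a' := List.count_pos_iff.mpr hmem
              rw [if_neg h0, if_neg h1, if_neg h2, if_pos h3,
                  if_neg (by rw [hcnt 'a', if_pos h3]; omega)]
              rw [hcnt 't', hcnt 'i', hcnt 'r', hcnt 'a',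
                  if_pos h3, if_neg (by rw [h3]; decide), if_neg (by rw [h3]; decide),
                  if_neg (by rw [h3]; decide)]
              simpa using hnext
            · rw [if_neg h0, if_neg h1, if_neg h2, if_neg h3]
              rw [hcnt 't', hcnt 'i', hcnt 'r', hcnt 'a',
                  if_neg h0, if_neg h1, if_neg h2, if_neg h3]
              simpa using hnext

def o2i (o : Option Nat) : Option Int := o.map Int.ofNat

theorem lastN_snoc_o2i (c v : Char) (p : List Char) :
    (if v = c then some ((p.length : Int)) else o2i (lastN c p)) = o2i (lastN c (p ++ [v])) := by
  rw [o2i, o2i, lastN_snoc]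
  split <;> simp

theorem allT_append (p : List Char) (v : Char) (h : AllT p = true) : AllT (p ++ [v]) = true := by
  simp only [AllT, Bool.and_eq_true, List.contains_iff_mem, List.mem_append] at h ⊢
  tauto

theorem allT_iff_isSome (l : List Char) :
    AllT l = true ↔ ((lastN 't' l).isSome = true ∧ (lastN 'i' l).isSome = true
      ∧ (lastN 'r' l).isSome = true ∧ (lastN 'a' l).isSome = true) := by
  simp only [AllT, Bool.and_eq_true, List.contains_iff_mem, mem_iff_lastN, Option.isSome_iff_exists]
  tauto

theorem minL_lt_len (p : List Char) (h : AllT p = true) : minL p < p.length := by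
  obtain ⟨kt, ki, kr, ka, et, ei, er, ea, -, -, -, -, hm⟩ :=
    allT_drop_dest p 0 (by simpa using h)
  have := (lastN_spec _ p kt et).1
  have := (lastN_spec _ p ki ei).1
  omega

theorem minL_le_lastN (p : List Char) (c : Char) (k : Nat)
    (hc : c = 't' ∨ c = 'i' ∨ c = 'r' ∨ c = 'a') (h : lastN c p = some k) : minL p ≤ k := by
  rcases hc with rfl | rfl | rfl | rfl <;> simp [minL, h]

theorem count_drop_snoc (p : List Char) (v x : Char) (left : Nat) (hle : left ≤ p.length) :
    ((p ++ [v]).drop left).count x = (p.drop left).count x + if v = x then 1 else 0 := by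
  rw [List.drop_append_of_le_length hle, List.count_append]
  simp [List.count_singleton, beq_iff_eq]

theorem allT_drop_iff (p : List Char) (v : Char) (left : Nat)
    (hleft : left = if AllT p = true then minL p else 0) :
    (AllT ((p ++ [v]).drop left) = true ↔ AllT (p ++ [v]) = true) := by
  constructor
  · intro h
    simp only [AllT, Bool.and_eq_true, List.contains_iff_mem] at h ⊢
    have hsub := List.drop_subset left (p ++ [v])
    exact ⟨⟨⟨hsub h.1.1.1, hsub h.1.1.2⟩, hsub h.1.2⟩, hsub h.2⟩
  · intro h
    obtain ⟨kt, ki, kr, ka, et, ei, er, ea, -, -, -, -, hm⟩ :=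
      allT_drop_dest (p ++ [v]) 0 (by simpa using h)
    have hle : ∀ (c : Char) (k : Nat), (c = 't' ∨ c = 'i' ∨ c = 'r' ∨ c = 'a') →
        lastN c (p ++ [v]) = some k → left ≤ k := by
      intro c k hc hk
      by_cases hA : AllT p = true
      · rw [hleft, if_pos hA]
        rw [lastN_snoc] at hk
        by_cases hv : v = c
        · rw [if_pos hv] at hk
          have := minL_lt_len p hA
          simp at hk
          omega
        · rw [if_neg hv] at hk
          exact minL_le_lastN p c k hc hk
      · rw [hleft, if_neg hA]; omega
    simp only [AllT, Bool.and_eq_true, List.contains_iff_mem]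
    refine ⟨⟨⟨?_, ?_⟩, ?_⟩, ?_⟩ <;> rw [mem_drop_iff]
    · exact ⟨kt, et, hle 't' kt (by tauto) et⟩
    · exact ⟨ki, ei, hle 'i' ki (by tauto) ei⟩
    · exact ⟨kr, er, hle 'r' kr (by tauto) er⟩
    · exact ⟨ka, ea, hle 'a' ka (by tauto) ea⟩

theorem step_inv (cs p : List Char) (v : Char) (hp : (p ++ [v]) <+: cs)
    (tot : Int) (left ct ci cr ca : Nat)
    (hleft : left = if AllT p = true then minL p else 0)
    (hct : ct = (p.drop left).count 't') (hci : ci = (p.drop left).count 'i')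
    (hcr : cr = (p.drop left).count 'r') (hca : ca = (p.drop left).count 'a') :
    (stepA (tot, o2i (lastN 't' p), o2i (lastN 'i' p),
        o2i (lastN 'r' p), o2i (lastN 'a' p))
        ((p.length : Int), v)).1
      = (stepB cs (tot, left, ct, ci, cr, ca) v).1
    ∧ (stepA (tot, o2i (lastN 't' p), o2i (lastN 'i' p),
        o2i (lastN 'r' p), o2i (lastN 'a' p))
        ((p.length : Int), v)).2.1 = o2i (lastN 't' (p ++ [v]))
    ∧ (stepA (tot, o2i (lastN 't' p), o2i (lastN 'i' p),
        o2i (lastN 'r' p), o2i (lastN 'a' p))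
        ((p.length : Int), v)).2.2.1 = o2i (lastN 'i' (p ++ [v]))
    ∧ (stepA (tot, o2i (lastN 't' p), o2i (lastN 'i' p),
        o2i (lastN 'r' p), o2i (lastN 'a' p))
        ((p.length : Int), v)).2.2.2.1 = o2i (lastN 'r' (p ++ [v]))
    ∧ (stepA (tot, o2i (lastN 't' p), o2i (lastN 'i' p),
        o2i (lastN 'r' p), o2i (lastN 'a' p))
        ((p.length : Int), v)).2.2.2.2 = o2i (lastN 'a' (p ++ [v]))
    ∧ (stepB cs (tot, left, ct, ci, cr, ca) v).2.1
        = (if AllT (p ++ [v]) = true then minL (p ++ [v]) else 0)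
    ∧ (stepB cs (tot, left, ct, ci, cr, ca) v).2.2.1
        = ((p ++ [v]).drop (stepB cs (tot, left, ct, ci, cr, ca) v).2.1).count 't'
    ∧ (stepB cs (tot, left, ct, ci, cr, ca) v).2.2.2.1
        = ((p ++ [v]).drop (stepB cs (tot, left, ct, ci, cr, ca) v).2.1).count 'i'
    ∧ (stepB cs (tot, left, ct, ci, cr, ca) v).2.2.2.2.1
        = ((p ++ [v]).drop (stepB cs (tot, left, ct, ci, cr, ca) v).2.1).count 'r'
    ∧ (stepB cs (tot, left, ct, ci, cr, ca) v).2.2.2.2.2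
        = ((p ++ [v]).drop (stepB cs (tot, left, ct, ci, cr, ca) v).2.1).count 'a' := by
  have hlen : left ≤ p.length := by
    by_cases hA : AllT p = true
    · rw [hleft, if_pos hA]; exact Nat.le_of_lt (minL_lt_len p hA)
    · rw [hleft, if_neg hA]; omega
  -- the four updated counts are the counts of the window extended by v
  have hchain :
      (if v = 't' then (ct + 1, ci, cr, ca)
       else if v = 'i' then (ct, ci + 1, cr, ca)
       else if v = 'r' then (ct, ci, cr + 1, ca)
       else if v = 'a' then (ct, ci, cr, ca + 1)
       else (ct, ci, cr, ca))
      = (((p ++ [v]).drop left).count 't', ((p ++ [v]).drop left).count 'i',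
         ((p ++ [v]).drop left).count 'r', ((p ++ [v]).drop left).count 'a') := by
    subst hct hci hcr hca
    rw [count_drop_snoc p v 't' left hlen, count_drop_snoc p v 'i' left hlen,
        count_drop_snoc p v 'r' left hlen, count_drop_snoc p v 'a' left hlen]
    split_ifs <;> simp_all
  -- the B-side guard is AllT of the appended list
  have hguard : ((((p ++ [v]).drop left).count 't' ≠ 0 ∧ (((p ++ [v]).drop left).count 'i') ≠ 0
      ∧ (((p ++ [v]).drop left).count 'r') ≠ 0 ∧ (((p ++ [v]).drop left).count 'a') ≠ 0)
      ↔ AllT (p ++ [v]) = true) := by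
    rw [← allT_drop_iff p v left hleft]
    simp only [AllT, Bool.and_eq_true, List.contains_iff_mem, ← List.count_pos_iff]
    omega
  simp only [stepA, stepB]
  rw [lastN_snoc_o2i 't' v p, lastN_snoc_o2i 'i' v p, lastN_snoc_o2i 'r' v p,
      lastN_snoc_o2i 'a' v p, hchain]
  by_cases hAll : AllT (p ++ [v]) = true
  · obtain ⟨kt, ki, kr, ka, et, ei, er, ea, -, -, -, -, hm⟩ :=
      allT_drop_dest (p ++ [v]) 0 (by simpa using hAll)
    have hAguard : ((o2i (lastN 't' (p ++ [v]))).isSome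
        && (o2i (lastN 'i' (p ++ [v]))).isSome
        && (o2i (lastN 'r' (p ++ [v]))).isSome
        && (o2i (lastN 'a' (p ++ [v]))).isSome) = true := by
      simp [o2i, et, ei, er, ea]
    rw [if_pos hAguard, if_pos (hguard.mpr hAll)]
    have hshr := shrink_eq cs (p ++ [v]) hp (minL (p ++ [v]) - left) left rfl
      ((allT_drop_iff p v left hleft).mpr hAll)
    rw [hshr]
    rw [if_pos hAll]
    refine ⟨?_, rfl, rfl, rfl, rfl, rfl, rfl, rfl, rfl, rfl⟩
    simp only [o2i, et, ei, er, ea, Option.map_some, Option.getD_some, Int.ofNat_eq_natCast]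
    rw [hm]
    push_cast
    omega
  · have hAguard : ((o2i (lastN 't' (p ++ [v]))).isSome
        && (o2i (lastN 'i' (p ++ [v]))).isSome
        && (o2i (lastN 'r' (p ++ [v]))).isSome
        && (o2i (lastN 'a' (p ++ [v]))).isSome) = false := by
      rw [allT_iff_isSome] at hAll
      simp only [o2i, Option.isSome_map]
      simp only [not_and_or, Bool.not_eq_true] at hAll
      rcases hAll with h | h | h | h <;> simp [h]
    rw [if_neg (by simp [hAguard]), if_neg (fun hc => hAll (hguard.mp hc)), if_neg hAll]
    have hA : AllT p ≠ true := fun hc => hAll (allT_append p v hc)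
    have hl0 : left = 0 := by rw [hleft, if_neg hA]
    exact ⟨rfl, rfl, rfl, rfl, rfl, by simp [hl0], rfl, rfl, rfl, rfl⟩

theorem main_inv (cs p : List Char) (hp : p <+: cs) :
    ((PySem.List.enumerate p 0).foldl stepA (0, none, none, none, none)).1
        = (p.foldl (stepB cs) (0, 0, 0, 0, 0, 0)).1
    ∧ ((PySem.List.enumerate p 0).foldl stepA (0, none, none, none, none)).2.1
        = o2i (lastN 't' p)
    ∧ ((PySem.List.enumerate p 0).foldl stepA (0, none, none, none, none)).2.2.1
        = o2i (lastN 'i' p)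
    ∧ ((PySem.List.enumerate p 0).foldl stepA (0, none, none, none, none)).2.2.2.1
        = o2i (lastN 'r' p)
    ∧ ((PySem.List.enumerate p 0).foldl stepA (0, none, none, none, none)).2.2.2.2
        = o2i (lastN 'a' p)
    ∧ (p.foldl (stepB cs) (0, 0, 0, 0, 0, 0)).2.1 = (if AllT p = true then minL p else 0)
    ∧ (p.foldl (stepB cs) (0, 0, 0, 0, 0, 0)).2.2.1
        = (p.drop (p.foldl (stepB cs) (0, 0, 0, 0, 0, 0)).2.1).count 't'
    ∧ (p.foldl (stepB cs) (0, 0, 0, 0, 0, 0)).2.2.2.1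
        = (p.drop (p.foldl (stepB cs) (0, 0, 0, 0, 0, 0)).2.1).count 'i'
    ∧ (p.foldl (stepB cs) (0, 0, 0, 0, 0, 0)).2.2.2.2.1
        = (p.drop (p.foldl (stepB cs) (0, 0, 0, 0, 0, 0)).2.1).count 'r'
    ∧ (p.foldl (stepB cs) (0, 0, 0, 0, 0, 0)).2.2.2.2.2
        = (p.drop (p.foldl (stepB cs) (0, 0, 0, 0, 0, 0)).2.1).count 'a' := by
  induction p using List.reverseRecOn with
  | nil =>
    refine ⟨rfl, rfl, rfl, rfl, rfl, ?_, rfl, rfl, rfl, rfl⟩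
    simp [AllT]
  | append_singleton p v ih =>
    have hp0 : p <+: cs := (List.prefix_append p [v]).trans hp
    obtain ⟨h1, ht, hi2, hr2, ha2, hleft, hct, hci, hcr, hca⟩ := ih hp0
    rw [PySem.List.enumerate_append, List.foldl_append, List.foldl_append]
    have hsing : PySem.List.enumerate [v] (0 + (p.length : Int)) = [((p.length : Int), v)] := by
      simp [PySem.List.enumerate_cons, PySem.List.enumerate_nil]
    rw [hsing]
    rcases hAst : (PySem.List.enumerate p 0).foldl stepA (0, none, none, none, none) with
      ⟨m0, mt0, mi0, mr0, ma0⟩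
    rcases hBst : p.foldl (stepB cs) (0, 0, 0, 0, 0, 0) with ⟨t0, l0, c1, c2, c3, c4⟩
    rw [hAst] at ht hi2 hr2 ha2
    rw [hBst] at h1 hleft hct hci hcr hca
    rw [hAst] at h1
    simp only at ht hi2 hr2 ha2 h1 hleft hct hci hcr hca
    subst ht hi2 hr2 ha2 h1
    simp only [List.foldl_cons, List.foldl_nil]
    exact step_inv cs p v hp _ _ _ _ _ _ hleft hct hci hcr hca

-- ===== VERDICT (by name: the statement is the Claim_ definition above) =====
theorem count_spec : Claim_equal_count := by
  intro s _
  unfold Spec_count count count_alt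
  exact (main_inv s.toList s.toList (List.prefix_refl _)).1
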